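-- pv_equiv track=rewrite | github.com/hvrc/rts | backend/wordnet_utils.py | is_word_contained
-- ===== SOURCE A (Python) =====
-- def is_word_contained(word1, word2):
--     word1, word2 = word1.lower(), word2.lower()
--
--     if word1 == word2:
--         return True
--
--     suffixes = [
--         ('s', ''),
--         ('es', ''),
--         ('ies', 'y'),
--         ('ing', ''),
--         ('ed', ''),
--         ('er', ''),
--         ('est', '')
--     ]
--
--     for suffix, replacement in suffixes:
--         if word1.endswith(suffix):
--             stem1 = word1[:-len(suffix)] + replacement
--             if stem1 == word2:
--                 return True
--         if word2.endswith(suffix):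
--             stem2 = word2[:-len(suffix)] + replacement
--             if stem2 == word1:
--                 return True
--
--     return False
-- ===== SOURCE B (Python) =====
-- # Common-residual algorithm: strip the longest common prefix of the two lowered
-- # words, then look the remaining suffix pair up in a fixed table of admissible
-- # (suffix, replacement) residues (in either orientation).
-- _PAIRS = [
--     ('', ''),
--     ('s', ''),
--     ('es', ''),
--     ('ies', 'y'),
--     ('ing', ''),
--     ('ed', ''),
--     ('er', ''),
--     ('est', ''),
-- ]
--
--
-- def is_word_contained(word1, word2):
--     a, b = word1.lower(), word2.lower()
--     i = 0
--     while i < len(a) and i < len(b) and a[i] == b[i]: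
--         i += 1
--     t1, t2 = a[i:], b[i:]
--     return (t1, t2) in _PAIRS or (t2, t1) in _PAIRS
-- ===== Notes on version B (the rewrite author's own statement) =====
-- stated objective: alternative
-- what changed: Instead of A's loop over 7 suffix rules testing endswith and rebuilding a stem for each word in turn, B strips the longest common prefix of the two lowered words once and decides by looking the residual suffix pair up (in either orientation) in a fixed table of admissible (suffix, replacement) residues.
import Mathlib
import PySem

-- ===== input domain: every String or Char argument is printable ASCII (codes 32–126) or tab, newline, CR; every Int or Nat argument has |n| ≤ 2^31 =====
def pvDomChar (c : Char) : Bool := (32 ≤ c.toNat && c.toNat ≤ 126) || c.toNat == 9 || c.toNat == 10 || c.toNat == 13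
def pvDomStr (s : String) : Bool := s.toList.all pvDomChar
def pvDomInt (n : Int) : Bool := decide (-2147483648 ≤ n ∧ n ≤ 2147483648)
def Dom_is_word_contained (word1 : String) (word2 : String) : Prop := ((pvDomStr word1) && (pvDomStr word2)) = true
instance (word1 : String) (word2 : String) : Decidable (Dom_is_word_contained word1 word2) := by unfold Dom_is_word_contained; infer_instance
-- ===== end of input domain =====

-- B replaces A's per-rule suffix/stem loop by a different algorithm — strip the longest common
-- prefix of the lowered words, then look the residual suffix pair up in a fixed table
-- (objective: alternative); proved to return the same Bool on every input.

-- ===== PORT A =====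
-- the literal suffix table of the Python source, as char lists
def pvSuffixes : List (List Char × List Char) :=
  [(['s'], []), (['e','s'], []), (['i','e','s'], ['y']), (['i','n','g'], []),
   (['e','d'], []), (['e','r'], []), (['e','s','t'], [])]

-- word[:-len(suffix)] + replacement
def pvStem (w suf rep : List Char) : List Char :=
  PySem.List.slice w none (some (-(suf.length : Int))) ++ rep

-- the for-loop with its early returns, rule by rule
def pvLoopA : List (List Char × List Char) → List Char → List Char → Bool
  | [], _, _ => false
  | (suf, rep) :: rest, w1, w2 =>
    if PySem.Chars.endswith w1 suf && pvStem w1 suf rep == w2 then true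
    else if PySem.Chars.endswith w2 suf && pvStem w2 suf rep == w1 then true
    else pvLoopA rest w1 w2

def is_word_contained (word1 : String) (word2 : String) : Bool :=
  let w1 := (PySem.Str.lower word1).toList
  let w2 := (PySem.Str.lower word2).toList
  if w1 == w2 then true
  else pvLoopA pvSuffixes w1 w2

-- ===== PORT B =====
-- Source B's _PAIRS table: the admissible residual (suffix, replacement) pairs
def pvPairs : List (List Char × List Char) :=
  [([], []), (['s'], []), (['e','s'], []), (['i','e','s'], ['y']), (['i','n','g'], []),
   (['e','d'], []), (['e','r'], []), (['e','s','t'], [])]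

-- Source B's while loop advancing past the longest common prefix, returning (a[i:], b[i:])
def pvResid : List Char → List Char → List Char × List Char
  | a :: as_, b :: bs => if a = b then pvResid as_ bs else (a :: as_, b :: bs)
  | as_, bs => (as_, bs)

def is_word_contained_alt (word1 : String) (word2 : String) : Bool :=
  let a := (PySem.Str.lower word1).toList
  let b := (PySem.Str.lower word2).toList
  let t := pvResid a b
  pvPairs.contains (t.1, t.2) || pvPairs.contains (t.2, t.1)

-- ===== PRECONDITION & SPEC =====
def Spec_is_word_contained (word1 : String) (word2 : String) (out : Bool) : Prop := out = is_word_contained_alt word1 word2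
instance (word1 : String) (word2 : String) (out : Bool) : Decidable (Spec_is_word_contained word1 word2 out) := by unfold Spec_is_word_contained; infer_instance

-- ===== CLAIM (what is proved, stated in full; the proofs are below) =====
def Claim_equal_is_word_contained : Prop := ∀ (word1 : String) (word2 : String), Dom_is_word_contained word1 word2 → Spec_is_word_contained word1 word2 (is_word_contained word1 word2)

-- ===== LEMMAS AND PROOFS =====

-- one-rule stems collected for an arbitrary rule list
def pvStems (rules : List (List Char × List Char)) (w : List Char) : List (List Char) :=
  rules.filterMap (fun p => if PySem.Chars.endswith w p.1 then some (pvStem w p.1 p.2) else none)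

-- the side condition pvSuffixes satisfies: nonempty suffix, and a replacement that never
-- starts with the suffix's first character
def pvGood (rules : List (List Char × List Char)) : Prop :=
  ∀ p ∈ rules, p.1 ≠ [] ∧ (p.2 = [] ∨ p.1.head? ≠ p.2.head?)

theorem pvGood_pvSuffixes : pvGood pvSuffixes := by
  intro p hp
  fin_cases hp <;> simp

-- A's loop answers exactly "w2 is a stem of w1 or w1 is a stem of w2"
set_option maxRecDepth 4096 in
theorem pvLoopA_eq_stems (rules : List (List Char × List Char)) (w1 w2 : List Char) :
    pvLoopA rules w1 w2 = ((pvStems rules w1).contains w2 || (pvStems rules w2).contains w1) := by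
  induction rules with
  | nil => simp [pvLoopA, pvStems]
  | cons p rest ih =>
    obtain ⟨suf, rep⟩ := p
    by_cases h1 : PySem.Chars.endswith w1 suf <;>
      by_cases h2 : PySem.Chars.endswith w2 suf <;>
        simp [pvLoopA, pvStems, h1, h2, ih] <;>
          (apply Bool.eq_iff_iff.mpr; simp; aesop)

-- stem under a nonempty suffix, rewritten to take/append
theorem pvStem_take (w suf rep : List Char) (h : suf ≠ []) :
    pvStem w suf rep = w.take (w.length - suf.length) ++ rep := by
  unfold pvStem
  rw [PySem.List.slice_to_neg_natCast w suf.length (List.length_pos_iff.mpr h)]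

-- G1: the empty word is among w's stems iff (w, []) is literally a rule
theorem pvStems_contains_nil (rules : List (List Char × List Char)) (w : List Char)
    (hg : pvGood rules) :
    (pvStems rules w).contains ([] : List Char) = rules.contains (w, ([] : List Char)) := by
  induction rules with
  | nil => simp [pvStems]
  | cons p rest ih =>
    obtain ⟨suf, rep⟩ := p
    obtain ⟨hsuf, -⟩ := hg (suf, rep) (by simp)
    dsimp only at hsuf
    have ih' := ih (fun q hq => hg q (by simp [hq]))
    by_cases he : PySem.Chars.endswith w suf
    · have hsfx : suf <:+ w := (PySem.Chars.endswith_iff w suf).mp he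
      have hlen : suf.length ≤ w.length := hsfx.length_le
      simp only [pvStems, List.filterMap_cons, he, if_pos, List.contains_cons]
      rw [show (List.filterMap (fun p => if PySem.Chars.endswith w p.1 = true then some (pvStem w p.1 p.2) else none) rest) = pvStems rest w from rfl, ih']
      congr 1
      rw [pvStem_take w suf rep hsuf]
      apply Bool.eq_iff_iff.mpr
      simp only [beq_iff_eq, Prod.mk.injEq]
      constructor
      · intro hap
        rcases List.append_eq_nil_iff.mp hap.symm with ⟨htk, hrp⟩
        have hwl : w.length ≤ suf.length := by
          by_contra hlt
          push Not at hlt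
          have hne : w.take (w.length - suf.length) ≠ [] := by
            simp only [ne_eq, List.take_eq_nil_iff]
            push Not
            constructor <;> [omega; exact fun hw => by simp [hw] at hlt]
          exact hne htk
        exact ⟨(hsfx.eq_of_length (by omega)).symm, hrp.symm⟩
      · rintro ⟨hw, hr⟩
        subst hw; rw [← hr]
        simp
    · simp only [pvStems, List.filterMap_cons, he, Bool.false_eq_true, not_false_eq_true,
        if_neg, List.contains_cons]
      have hne : ((w, ([] : List Char)) == (suf, rep)) = false := by
        apply beq_eq_false_iff_ne.mpr
        rintro ⟨⟩
        exact absurd ((PySem.Chars.endswith_iff w w).mpr (List.suffix_refl w)) (by simp [he])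
      rw [hne, Bool.false_or]
      exact ih'

-- G2: prepending a common character preserves "is a stem of"
theorem pvStems_contains_cons_eq (rules : List (List Char × List Char)) (c : Char)
    (x y : List Char) (hg : pvGood rules) :
    (pvStems rules (c :: x)).contains (c :: y) = (pvStems rules x).contains y := by
  induction rules with
  | nil => simp [pvStems]
  | cons p rest ih =>
    obtain ⟨suf, rep⟩ := p
    obtain ⟨hsuf, hrep⟩ := hg (suf, rep) (by simp)
    dsimp only at hsuf hrep
    have ih' := ih (fun q hq => hg q (by simp [hq]))
    by_cases h1 : suf <:+ x
    · have he1 : PySem.Chars.endswith (c :: x) suf = true :=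
        (PySem.Chars.endswith_iff _ _).mpr (List.suffix_cons_iff.mpr (Or.inr h1))
      have he2 : PySem.Chars.endswith x suf = true :=
        (PySem.Chars.endswith_iff _ _).mpr h1
      have hlen : suf.length ≤ x.length := h1.length_le
      simp only [pvStems, List.filterMap_cons, he1, he2, if_pos, List.contains_cons]
      rw [show (List.filterMap (fun p => if PySem.Chars.endswith (c :: x) p.1 = true then some (pvStem (c :: x) p.1 p.2) else none) rest) = pvStems rest (c :: x) from rfl,
         show (List.filterMap (fun p => if PySem.Chars.endswith x p.1 = true then some (pvStem x p.1 p.2) else none) rest) = pvStems rest x from rfl, ih']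
      congr 1
      rw [pvStem_take _ suf rep hsuf, pvStem_take _ suf rep hsuf]
      have hl : (c :: x).length - suf.length = (x.length - suf.length) + 1 := by
        simp only [List.length_cons]; omega
      rw [hl, List.take_succ_cons]
      simp
    · by_cases h2 : suf = c :: x
      · have he1 : PySem.Chars.endswith (c :: x) suf = true :=
          (PySem.Chars.endswith_iff _ _).mpr (h2 ▸ List.suffix_refl _)
        have he2 : PySem.Chars.endswith x suf = false := by
          apply (Bool.not_eq_true _).mp
          intro hc
          exact h1 ((PySem.Chars.endswith_iff _ _).mp hc)
        have hst : pvStem (c :: x) suf rep = rep := by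
          rw [pvStem_take _ suf rep hsuf, h2]
          simp
        have hne : ((c :: y) == pvStem (c :: x) suf rep) = false := by
          rw [hst]
          apply beq_eq_false_iff_ne.mpr
          intro hc
          rcases hrep with h | h
          · rw [h] at hc; exact List.cons_ne_nil _ _ hc
          · exact h (by simp [h2, ← hc])
        simp only [pvStems, List.filterMap_cons, he1, he2, if_pos, Bool.false_eq_true,
          not_false_eq_true, if_neg, List.contains_cons, hne, Bool.false_or]
        exact ih'
      · have he1 : PySem.Chars.endswith (c :: x) suf = false := by
          apply (Bool.not_eq_true _).mp
          intro hc
          rcases List.suffix_cons_iff.mp ((PySem.Chars.endswith_iff _ _).mp hc) with h | h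
          · exact h2 h
          · exact h1 h
        have he2 : PySem.Chars.endswith x suf = false := by
          apply (Bool.not_eq_true _).mp
          intro hc
          exact h1 ((PySem.Chars.endswith_iff _ _).mp hc)
        simp only [pvStems, List.filterMap_cons, he1, he2, Bool.false_eq_true,
          not_false_eq_true, if_neg]
        exact ih'

-- G3: with differing leading characters, "is a stem of" means the pair is literally a rule
theorem pvStems_contains_cons_ne (rules : List (List Char × List Char)) (c d : Char)
    (x y : List Char) (hg : pvGood rules) (hcd : c ≠ d) :
    (pvStems rules (c :: x)).contains (d :: y) = rules.contains (c :: x, d :: y) := by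
  induction rules with
  | nil => simp [pvStems]
  | cons p rest ih =>
    obtain ⟨suf, rep⟩ := p
    obtain ⟨hsuf, -⟩ := hg (suf, rep) (by simp)
    dsimp only at hsuf
    have ih' := ih (fun q hq => hg q (by simp [hq]))
    by_cases he : PySem.Chars.endswith (c :: x) suf
    · rcases List.suffix_cons_iff.mp ((PySem.Chars.endswith_iff _ _).mp he) with h2 | h1
      · have hst : pvStem (c :: x) suf rep = rep := by
          rw [pvStem_take _ suf rep hsuf, h2]
          simp
        simp only [pvStems, List.filterMap_cons, he, if_pos, List.contains_cons, hst]
        rw [show (List.filterMap (fun p => if PySem.Chars.endswith (c :: x) p.1 = true then some (pvStem (c :: x) p.1 p.2) else none) rest) = pvStems rest (c :: x) from rfl, ih']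
        congr 1
        apply Bool.eq_iff_iff.mpr
        simp only [beq_iff_eq, Prod.mk.injEq]
        constructor
        · intro h; exact ⟨h2.symm, by simp [h]⟩
        · rintro ⟨-, h⟩; simp [h]
      · have hlen : suf.length ≤ x.length := h1.length_le
        have hne : ((d :: y) == pvStem (c :: x) suf rep) = false := by
          rw [pvStem_take _ suf rep hsuf]
          have hl : (c :: x).length - suf.length = (x.length - suf.length) + 1 := by
            simp only [List.length_cons]; omega
          rw [hl, List.take_succ_cons]
          apply beq_eq_false_iff_ne.mpr
          intro hc
          exact hcd (by injection hc with h _; exact h.symm) |>.elim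
        have hne2 : (((c :: x, d :: y) : List Char × List Char) == (suf, rep)) = false := by
          apply beq_eq_false_iff_ne.mpr
          rintro ⟨⟩
          have := h1.length_le
          simp at this
        simp only [pvStems, List.filterMap_cons, he, if_pos, List.contains_cons,
          hne, hne2, Bool.false_or]
        exact ih'
    · have hne2 : (((c :: x, d :: y) : List Char × List Char) == (suf, rep)) = false := by
        apply beq_eq_false_iff_ne.mpr
        rintro ⟨⟩
        exact absurd ((PySem.Chars.endswith_iff (c :: x) (c :: x)).mpr (List.suffix_refl _))
          (by simp [he])
      simp only [pvStems, List.filterMap_cons, he, Bool.false_eq_true, not_false_eq_true,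
        if_neg, List.contains_cons, hne2, Bool.false_or]
      exact ih'

-- A's whole check in disjunctive normal form
theorem pvA_eq_or (w1 w2 : List Char) :
    (if w1 == w2 then true else pvLoopA pvSuffixes w1 w2) =
      ((w1 == w2) || (pvStems pvSuffixes w1).contains w2 || (pvStems pvSuffixes w2).contains w1) := by
  by_cases h : w1 = w2
  · simp [h]
  · have hb : (w1 == w2) = false := beq_eq_false_iff_ne.mpr h
    simp [hb, pvLoopA_eq_stems]

theorem pvPairs_cons : pvPairs = ([], []) :: pvSuffixes := rfl

-- the main correspondence, on the lowered char lists
theorem pvMain (w1 w2 : List Char) :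
    (if w1 == w2 then true else pvLoopA pvSuffixes w1 w2) =
      (pvPairs.contains ((pvResid w1 w2).1, (pvResid w1 w2).2) ||
       pvPairs.contains ((pvResid w1 w2).2, (pvResid w1 w2).1)) := by
  rw [pvA_eq_or]
  induction w1 generalizing w2 with
  | nil =>
    cases w2 with
    | nil => decide
    | cons d y =>
      have h1 : pvStems pvSuffixes ([] : List Char) = [] := by decide
      have h2 := pvStems_contains_nil pvSuffixes (d :: y) pvGood_pvSuffixes
      simp only [pvResid, pvPairs_cons, List.contains_cons, h1, h2]
      apply Bool.eq_iff_iff.mpr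
      simp [pvSuffixes]
  | cons c x ih =>
    cases w2 with
    | nil =>
      have h1 : pvStems pvSuffixes ([] : List Char) = [] := by decide
      have h2 := pvStems_contains_nil pvSuffixes (c :: x) pvGood_pvSuffixes
      simp only [pvResid, pvPairs_cons, List.contains_cons, h1, h2]
      apply Bool.eq_iff_iff.mpr
      simp [pvSuffixes]
    | cons d y =>
      by_cases hcd : c = d
      · subst hcd
        have g1 := pvStems_contains_cons_eq pvSuffixes c x y pvGood_pvSuffixes
        have g2 := pvStems_contains_cons_eq pvSuffixes c y x pvGood_pvSuffixes
        simp only [pvResid, g1, g2, List.cons_beq_cons, beq_self_eq_true,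
          Bool.true_and]
        exact ih y
      · have g1 := pvStems_contains_cons_ne pvSuffixes c d x y pvGood_pvSuffixes hcd
        have g2 := pvStems_contains_cons_ne pvSuffixes d c y x pvGood_pvSuffixes (Ne.symm hcd)
        have heq : ((c :: x) == (d :: y)) = false := by
          apply beq_eq_false_iff_ne.mpr
          intro hc
          exact hcd (by injection hc)
        simp only [pvResid, if_neg hcd, g1, g2, heq, Bool.false_or, pvPairs_cons,
          List.contains_cons]
        apply Bool.eq_iff_iff.mpr
        simp

-- ===== VERDICT (by name: the statement is the Claim_ definition above) =====
theorem is_word_contained_spec : Claim_equal_is_word_contained := by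
  intro word1 word2 _
  unfold Spec_is_word_contained is_word_contained is_word_contained_alt
  exact pvMain _ _
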